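-- pv_equiv track=rewrite | github.com/kanedeiley/advent_of_code | 2025/12-01/12-01-p2.py | update_dial
-- ===== SOURCE A (Python) =====
-- from typing import List, Tuple
--
-- def update_dial(current: int, spins: int, direction: bool) -> Tuple[int, int]:
--     """
--     Move the dial one click at a time and count exact zero hits.
--     """
--     zero_hits = 0
--     for _ in range(spins):
--         # Move one step
--         if direction:
--             current = (current + 1) % 100
--         else:
--             current = (current - 1) % 100
--
--         if current == 0:
--             zero_hits += 1
--
--     return current, zero_hits
-- ===== SOURCE B (Python) =====
-- def update_dial(current: int, spins: int, direction: bool):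
--     """O(1) closed form: final position by modular arithmetic, zero hits
--     by counting k in [1, spins] with the dial at 0 after step k."""
--     if spins <= 0:
--         return current, 0
--     if direction:
--         final = (current + spins) % 100
--         r = (-current) % 100
--     else:
--         final = (current - spins) % 100
--         r = current % 100
--     if r == 0:
--         r = 100
--     return final, (spins - r) // 100 + 1
-- ===== Notes on version B (the rewrite author's own statement) =====
-- stated objective: faster
-- what changed: Replaced the step-by-step spin loop with O(1) closed-form modular arithmetic: final position via (current +/- spins) % 100 and the zero-hit count via floor division on the first step index that lands on 0.
import Mathlib
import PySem

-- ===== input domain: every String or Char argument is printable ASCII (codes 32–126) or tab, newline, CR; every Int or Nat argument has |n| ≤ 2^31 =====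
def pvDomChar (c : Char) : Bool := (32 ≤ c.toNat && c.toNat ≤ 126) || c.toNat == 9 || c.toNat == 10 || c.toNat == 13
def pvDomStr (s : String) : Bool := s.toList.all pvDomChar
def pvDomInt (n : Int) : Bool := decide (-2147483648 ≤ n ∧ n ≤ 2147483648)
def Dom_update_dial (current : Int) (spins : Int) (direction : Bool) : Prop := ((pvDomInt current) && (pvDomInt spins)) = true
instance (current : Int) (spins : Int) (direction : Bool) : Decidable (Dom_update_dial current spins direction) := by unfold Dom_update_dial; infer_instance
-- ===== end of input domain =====

-- B replaces A's one-click-at-a-time loop with O(1) closed-form modular arithmetic (objective: faster, asymptotic).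


-- ===== PORT A =====
-- literal port of A: iterate over range(spins), one step per click, count exact zero hits
def update_dial (current : Int) (spins : Int) (direction : Bool) : Int × Int :=
  (PySem.List.pyRange 0 spins 1).foldl
    (fun st _ =>
      let c := if direction then PySem.Int.mod (st.1 + 1) 100 else PySem.Int.mod (st.1 - 1) 100
      (c, if c = 0 then st.2 + 1 else st.2))
    (current, 0)

-- ===== PORT B =====
-- literal port of Source B: closed-form final position and zero-hit count
def update_dial_alt (current : Int) (spins : Int) (direction : Bool) : Int × Int :=
  if spins ≤ 0 then (current, 0)
  else
    let final := if direction then PySem.Int.mod (current + spins) 100 else PySem.Int.mod (current - spins) 100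
    let r0 := if direction then PySem.Int.mod (-current) 100 else PySem.Int.mod current 100
    let r := if r0 = 0 then (100 : Int) else r0
    (final, PySem.Int.floordiv (spins - r) 100 + 1)

-- ===== PRECONDITION & SPEC =====
def Spec_update_dial (current : Int) (spins : Int) (direction : Bool) (out : Int × Int) : Prop := out = update_dial_alt current spins direction
instance (current : Int) (spins : Int) (direction : Bool) (out : Int × Int) : Decidable (Spec_update_dial current spins direction out) := by unfold Spec_update_dial; infer_instance

-- ===== CLAIM (what is proved, stated in full; the proofs are below) =====
def Claim_equal_update_dial : Prop := ∀ (current : Int) (spins : Int) (direction : Bool), Dom_update_dial current spins direction → Spec_update_dial current spins direction (update_dial current spins direction)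

-- ===== LEMMAS AND PROOFS =====

-- one click of A's loop body
def pvStep (d : Bool) (st : Int × Int) : Int × Int :=
  let c := if d then PySem.Int.mod (st.1 + 1) 100 else PySem.Int.mod (st.1 - 1) 100
  (c, if c = 0 then st.2 + 1 else st.2)

-- A's loop as a recursion on the iteration count
def pvLoop (d : Bool) : Nat → Int × Int → Int × Int
  | 0, st => st
  | n+1, st => pvLoop d n (pvStep d st)

theorem pv_foldl_eq_loop (d : Bool) (l : List Int) (st : Int × Int) :
    l.foldl (fun st _ =>
      let c := if d then PySem.Int.mod (st.1 + 1) 100 else PySem.Int.mod (st.1 - 1) 100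
      (c, if c = 0 then st.2 + 1 else st.2)) st = pvLoop d l.length st := by
  induction l generalizing st with
  | nil => rfl
  | cons x xs ih => simpa [pvLoop, pvStep] using ih (pvStep d st)

theorem pv_loop_eq_alt (d : Bool) (n : Nat) :
    ∀ (c h : Int), pvLoop d n (c, h) = ((update_dial_alt c n d).1, h + (update_dial_alt c n d).2) := by
  induction n with
  | zero =>
    intro c h
    simp [pvLoop, update_dial_alt]
  | succ n ih =>
    intro c h
    have hmod : ∀ a : Int, PySem.Int.mod a 100 = a % 100 :=
      fun a => PySem.Int.mod_eq_emod_of_pos (by norm_num)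
    have hdiv : ∀ a : Int, PySem.Int.floordiv a 100 = a / 100 :=
      fun a => PySem.Int.floordiv_eq_ediv_of_pos (by norm_num)
    show pvLoop d n (pvStep d (c, h)) = _
    rcases d with _ | _ <;>
      · simp only [pvStep, ih, update_dial_alt, hmod, hdiv, Bool.false_eq_true, if_false, if_true,
          Prod.mk.injEq, Nat.cast_succ]
        split_ifs <;> constructor <;> omega

-- ===== VERDICT (by name: the statement is the Claim_ definition above) =====
theorem update_dial_spec : Claim_equal_update_dial := by
  intro current spins direction _
  unfold Spec_update_dial update_dial
  rw [pv_foldl_eq_loop, PySem.List.length_pyRange_one]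
  by_cases hle : spins ≤ 0
  · have : (spins - 0).toNat = 0 := by omega
    rw [this]
    simp [pvLoop, update_dial_alt, hle]
  · have hcast : ((spins - 0).toNat : Int) = spins := by omega
    rw [pv_loop_eq_alt, hcast]
    simp
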